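-- pv_equiv track=rewrite | github.com/LordOfReinkeness/advent-of-code | challenges/_2024/_7/part_2.py | get_solutions_strings
-- ===== SOURCE A (Python) =====
-- def get_solutions_strings(array):
-- 	if len(array) > 1:
-- 		out = []
-- 		subarray = get_solutions_strings(array[1:])
-- 		for line in subarray:
-- 			out.append('{} + {}'.format(str(array[0]), line ))
-- 			out.append('{} * {}'.format(str(array[0]), line ))
-- 			out.append('{} || {}'.format(str(array[0]), line ))
--
-- 		return out
-- 	else:
-- 		return [str(array[0])]
-- ===== SOURCE B (Python) =====
-- def _enum(init, elems):
--     # all operator insertions for 'elems', appended to 'init';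
--     # combination i's separators are the base-3 digits of i (least-significant = leftmost)
--     seps = [' + ', ' * ', ' || ']
--     out = []
--     for i in range(3 ** len(elems)):
--         s = init
--         code = i
--         for el in elems:
--             s = s + seps[code % 3] + str(el)
--             code //= 3
--         out.append(s)
--     return out
--
-- def get_solutions_strings(array):
--     first = str(array[0])
--     rest = array[1:]
--     m = len(rest) // 2
--     heads = _enum(first, rest[:m])   # fast-varying (leftmost) operators
--     tails = _enum('', rest[m:])      # slow-varying operators
--     return [h + t for t in tails for h in heads]
-- ===== Notes on version B (the rewrite author's own statement) =====
-- stated objective: alternative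
-- what changed: Replaces the suffix recursion (recurse on the tail, prepend each of the three operators to every line) by a flat base-3 counter enumeration split meet-in-the-middle: each half's strings are built once by indexing operators with the base-3 digits of a counter, and every output is a single concatenation of a precomputed head and tail.
import Mathlib
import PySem

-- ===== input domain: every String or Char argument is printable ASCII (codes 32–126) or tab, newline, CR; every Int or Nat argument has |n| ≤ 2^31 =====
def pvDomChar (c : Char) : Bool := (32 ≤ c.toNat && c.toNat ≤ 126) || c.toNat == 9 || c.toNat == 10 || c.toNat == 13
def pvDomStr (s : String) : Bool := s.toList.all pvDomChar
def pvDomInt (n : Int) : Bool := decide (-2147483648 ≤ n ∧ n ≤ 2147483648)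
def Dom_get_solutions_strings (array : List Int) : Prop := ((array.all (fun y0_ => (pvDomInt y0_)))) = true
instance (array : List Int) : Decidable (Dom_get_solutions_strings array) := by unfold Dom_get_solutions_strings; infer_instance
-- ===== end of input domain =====

-- B replaces A's suffix recursion by a meet-in-the-middle base-3 counter enumeration
-- (one concatenation of two precomputed half-strings per output); objective: alternative.

-- ===== PORT A =====
def get_solutions_strings : List Int → List String
  | [] => []  -- unreachable under Pre_ (Python A raises IndexError on the empty list)
  | [a] => [PySem.Int.toStr a]
  | a :: rest@(_ :: _) =>
      (get_solutions_strings rest).foldl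
        (fun out line =>
          out ++ [PySem.Int.toStr a ++ " + " ++ line,
                  PySem.Int.toStr a ++ " * " ++ line,
                  PySem.Int.toStr a ++ " || " ++ line]) []

-- ===== PORT B =====
-- seps[m] for m = code % 3 ∈ {0,1,2}
def pvSep (m : Nat) : String := if m = 0 then " + " else if m = 1 then " * " else " || "

-- the inner loop of _enum in Source B: s = s + seps[code % 3] + str(el); code //= 3
def pvBuild (s : String) (code : Nat) : List Int → String
  | [] => s
  | el :: rest => pvBuild (s ++ pvSep (code % 3) ++ PySem.Int.toStr el) (code / 3) rest

-- _enum in Source B: the outer loop over range(3 ** len(elems))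
def pvEnum (init : String) (elems : List Int) : List String :=
  (List.range (3 ^ elems.length)).map (fun i => pvBuild init i elems)

def get_solutions_strings_alt (array : List Int) : List String :=
  match array with
  | [] => []  -- unreachable under Pre_ (Source B raises IndexError on the empty list)
  | a :: rest =>
      let m := rest.length / 2
      (pvEnum "" (rest.drop m)).flatMap
        (fun t => (pvEnum (PySem.Int.toStr a) (rest.take m)).map (fun h => h ++ t))

-- ===== PRECONDITION & SPEC =====
-- Pre_ excludes only the empty list, on which both Python programs raise IndexError.
def Pre_get_solutions_strings (array : List Int) : Prop := array ≠ []
instance (array : List Int) : Decidable (Pre_get_solutions_strings array) := by unfold Pre_get_solutions_strings; infer_instance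
def pvWitness_get_solutions_strings : List Int := ([1, 2, 3] : List Int)

def Spec_get_solutions_strings (array : List Int) (out : List String) : Prop := out = get_solutions_strings_alt array
instance (array : List Int) (out : List String) : Decidable (Spec_get_solutions_strings array out) := by unfold Spec_get_solutions_strings; infer_instance

-- ===== CLAIM (what is proved, stated in full; the proofs are below) =====
def Claim_equal_get_solutions_strings : Prop := ∀ (array : List Int), Dom_get_solutions_strings array → Pre_get_solutions_strings array → Spec_get_solutions_strings array (get_solutions_strings array)

-- ===== LEMMAS AND PROOFS =====

-- a common prefix factors out of the built string
theorem pvBuild_prefix (xs : List Int) (p s : String) (c : Nat) :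
    pvBuild (p ++ s) c xs = p ++ pvBuild s c xs := by
  induction xs generalizing s c with
  | nil => rfl
  | cons x xs ih =>
      simp only [pvBuild, String.append_assoc]
      exact ih _ _

-- enumerating range (3*n) in blocks of three
theorem range_three_mul (n : Nat) (f : Nat → String) :
    (List.range (3 * n)).map f
      = (List.range n).flatMap (fun j => [f (3*j), f (3*j+1), f (3*j+2)]) := by
  induction n with
  | zero => rfl
  | succ n ih =>
      have h3 : 3 * (n+1) = (3*n + 1 + 1) + 1 := by ring
      rw [h3, List.range_succ, List.range_succ, List.range_succ, List.range_succ]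
      simp only [List.map_append, List.flatMap_append, ih]
      simp [List.flatMap]

-- the key characterisation: A on a :: rest equals the flat base-3 enumeration
theorem key (rest : List Int) (a : Int) :
    get_solutions_strings (a :: rest) = pvEnum (PySem.Int.toStr a) rest := by
  unfold pvEnum
  induction rest generalizing a with
  | nil => simp [get_solutions_strings, pvBuild, List.range_one]
  | cons x xs ih =>
      have hfoldl := PySem.List.foldl_append_eq_flatMap
        (l := get_solutions_strings (x :: xs)) (acc := ([] : List String))
        (g := fun line => [PySem.Int.toStr a ++ " + " ++ line,
                           PySem.Int.toStr a ++ " * " ++ line,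
                           PySem.Int.toStr a ++ " || " ++ line])
      have hpow : (3 : Nat) ^ (x :: xs).length = 3 * 3 ^ xs.length := by
        simp [pow_succ, Nat.mul_comm]
      calc get_solutions_strings (a :: x :: xs)
          = (get_solutions_strings (x :: xs)).flatMap
              (fun line => [PySem.Int.toStr a ++ " + " ++ line,
                            PySem.Int.toStr a ++ " * " ++ line,
                            PySem.Int.toStr a ++ " || " ++ line]) := by
            simpa [get_solutions_strings] using hfoldl
        _ = (List.range (3 ^ xs.length)).flatMap
              (fun j => [PySem.Int.toStr a ++ " + " ++ pvBuild (PySem.Int.toStr x) j xs,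
                         PySem.Int.toStr a ++ " * " ++ pvBuild (PySem.Int.toStr x) j xs,
                         PySem.Int.toStr a ++ " || " ++ pvBuild (PySem.Int.toStr x) j xs]) := by
            rw [ih x, List.flatMap_map]
        _ = (List.range (3 ^ (x :: xs).length)).map
              (fun i => pvBuild (PySem.Int.toStr a) i (x :: xs)) := by
            rw [hpow, range_three_mul]
            refine (List.flatMap_congr ?_).symm
            intro j hj
            have e0 : (3*j) % 3 = 0 := by omega
            have e0' : (3*j) / 3 = j := by omega
            have e1 : (3*j+1) % 3 = 1 := by omega
            have e1' : (3*j+1) / 3 = j := by omega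
            have e2 : (3*j+2) % 3 = 2 := by omega
            have e2' : (3*j+2) / 3 = j := by omega
            simp only [pvBuild, e0, e0', e1, e1', e2, e2', pvSep, pvBuild_prefix,
              String.append_assoc]
            simp

-- splitting the counter's digits across an append of the element list
theorem pvBuild_split (xs ys : List Int) (s : String) (r q : Nat) (hr : r < 3 ^ xs.length) :
    pvBuild s (r + 3 ^ xs.length * q) (xs ++ ys)
      = pvBuild s r xs ++ pvBuild "" q ys := by
  induction xs generalizing s r with
  | nil =>
      have hr0 : r = 0 := by simpa using hr
      subst hr0
      have : s = s ++ "" := by simp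
      rw [this]
      simpa using pvBuild_prefix ys s "" q
  | cons x xs ih =>
      have hmod : (r + 3 ^ (x :: xs).length * q) % 3 = r % 3 := by
        have : 3 ^ (x :: xs).length * q = 3 * (3 ^ xs.length * q) := by
          simp [pow_succ]; ring
        rw [this]
        omega
      have hdiv : (r + 3 ^ (x :: xs).length * q) / 3 = r / 3 + 3 ^ xs.length * q := by
        have : 3 ^ (x :: xs).length * q = 3 * (3 ^ xs.length * q) := by
          simp [pow_succ]; ring
        rw [this]
        omega
      have hr' : r / 3 < 3 ^ xs.length := by
        have : (3 : Nat) ^ (x :: xs).length = 3 * 3 ^ xs.length := by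
          simp [pow_succ, Nat.mul_comm]
        omega
      simp only [List.cons_append, pvBuild, hmod, hdiv]
      exact ih _ _ hr'

-- enumerating range (M*N) block-wise: slow quotient outside, fast remainder inside
theorem range_mul_map (M N : Nat) (f : Nat → String) :
    (List.range (M * N)).map f
      = (List.range N).flatMap (fun q => (List.range M).map (fun r => f (r + M * q))) := by
  induction N with
  | zero => simp
  | succ n ih =>
      have hMN : M * (n + 1) = M * n + M := by ring
      rw [hMN, List.range_add, List.range_succ]
      simp only [List.map_append, List.flatMap_append, ih, List.map_map]
      simp [Function.comp, Nat.add_comm]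

-- the meet-in-the-middle split of the enumeration
theorem pvEnum_split (xs ys : List Int) (s : String) :
    pvEnum s (xs ++ ys)
      = (pvEnum "" ys).flatMap (fun t => (pvEnum s xs).map (fun h => h ++ t)) := by
  unfold pvEnum
  have hpow : (3 : Nat) ^ (xs ++ ys).length = 3 ^ xs.length * 3 ^ ys.length := by
    simp [pow_add]
  rw [hpow, range_mul_map, List.flatMap_map]
  refine List.flatMap_congr ?_
  intro q hq
  simp only [List.map_map]
  refine List.map_congr_left ?_
  intro r hr
  have hr' : r < 3 ^ xs.length := List.mem_range.mp hr
  exact pvBuild_split xs ys s r q hr'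

-- ===== VERDICT (by name: the statement is the Claim_ definition above) =====
theorem get_solutions_strings_spec : Claim_equal_get_solutions_strings := by
  intro array _ hpre
  unfold Spec_get_solutions_strings
  cases array with
  | nil => exact absurd rfl hpre
  | cons a rest =>
      have h := key rest a
      have hsplit := pvEnum_split (rest.take (rest.length / 2)) (rest.drop (rest.length / 2))
        (PySem.Int.toStr a)
      rw [List.take_append_drop] at hsplit
      simp only [get_solutions_strings_alt]
      rw [h, hsplit]
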